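-- pv_equiv track=rewrite | github.com/helgefmi/aoc2019 | day24/part1.py | compute
-- ===== SOURCE A (Python) =====
-- from typing import Generator
-- from typing import List
--
-- Screen = List[str]
--
-- def screen_hash(scr: Screen) -> int:
--     return hash('\n'.join(scr))
--
-- def biodiversity_rating(scr: Screen) -> int:
--     ret = 0
--     for y, row in enumerate(scr):
--         for x, c in enumerate(row):
--             i = y * len(scr[0]) + x
--             if c == '#':
--                 ret += 2 ** i
--     return ret
--
-- def get_adjacents(scr: Screen, x: int, y: int) -> Generator[str, None, None]:
--     height = len(scr)
--     width = len(scr[0])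
--
--     for dir_x, dir_y in [(0, 1), (1, 0), (0, -1), (-1, 0)]:
--         child_x = x + dir_x
--         child_y = y + dir_y
--         if not (0 <= child_x < width):
--             yield '.'
--         elif not (0 <= child_y < height):
--             yield '.'
--         else:
--             yield scr[child_y][child_x]
--
-- def iterate(scr: Screen) -> Screen:
--     new_scr = []
--     for y, row in enumerate(scr):
--         new_row = ''
--         for x, c in enumerate(row):
--             adjacents = get_adjacents(scr, x, y)
--             num_adjacent_bugs = sum(1 for adjacent in adjacents if adjacent == '#')
--             if c == '#':
--                 new_row += '#' if num_adjacent_bugs == 1 else '.'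
--             else:
--                 new_row += '#' if num_adjacent_bugs in [1, 2] else '.'
--         new_scr.append(new_row)
--     return new_scr
--
-- def compute(cts: str) -> int:
--     scr = cts.splitlines()
--
--     mem = set()
--     while True:
--         key = screen_hash(scr)
--         if key in mem:
--             return biodiversity_rating(scr)
--         mem.add(key)
--
--         scr = iterate(scr)
--
--     raise RuntimeError('unreachable')
-- ===== SOURCE B (Python) =====
-- def compute(cts: str) -> int:
--     grid = cts.splitlines()
--     height = len(grid)
--     width = len(grid[0]) if grid else 0
--
--     def bug(g, y, x):
--         # a bug at (x, y): inside the width/height rectangle and a '#' there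
--         if not (0 <= y < height and 0 <= x < width):
--             return 0
--         row = g[y]
--         return 1 if x < len(row) and row[x] == '#' else 0
--
--     def step(g):
--         out = []
--         for y in range(height):
--             row = g[y]
--             new = []
--             for x in range(len(row)):
--                 n = bug(g, y, x - 1) + bug(g, y, x + 1) + bug(g, y - 1, x) + bug(g, y + 1, x)
--                 alive = row[x] == '#'
--                 new.append('#' if n == 1 or (not alive and n == 2) else '.')
--             out.append(''.join(new))
--         return out
--
--     def rating(g):
--         total = 0
--         for y in range(height):
--             row = g[y]
--             for x in range(len(row)):
--                 if row[x] == '#':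
--                     total += 2 ** (width * y + x)
--         return total
--
--     # Floyd's tortoise-and-hare: find a meeting point inside the cycle ...
--     tortoise = step(grid)
--     hare = step(step(grid))
--     while tortoise != hare:
--         tortoise = step(tortoise)
--         hare = step(step(hare))
--     # ... then walk to the cycle start: the first repeated screen.
--     slow = grid
--     while slow != hare:
--         slow = step(slow)
--         hare = step(hare)
--     return rating(slow)
-- ===== Notes on version B (the rewrite author's own statement) =====
-- stated objective: alternative
-- what changed: B replaces A's visited-set cycle detection (hash each screen, store in a set, stop on the first hit) by Floyd's tortoise-and-hare algorithm in O(1) memory: phase 1 finds a meeting point inside the cycle, phase 2 walks tortoise and hare in lockstep to the cycle start, which is exactly the first repeated screen, and only that one screen is rated.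
import Mathlib
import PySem

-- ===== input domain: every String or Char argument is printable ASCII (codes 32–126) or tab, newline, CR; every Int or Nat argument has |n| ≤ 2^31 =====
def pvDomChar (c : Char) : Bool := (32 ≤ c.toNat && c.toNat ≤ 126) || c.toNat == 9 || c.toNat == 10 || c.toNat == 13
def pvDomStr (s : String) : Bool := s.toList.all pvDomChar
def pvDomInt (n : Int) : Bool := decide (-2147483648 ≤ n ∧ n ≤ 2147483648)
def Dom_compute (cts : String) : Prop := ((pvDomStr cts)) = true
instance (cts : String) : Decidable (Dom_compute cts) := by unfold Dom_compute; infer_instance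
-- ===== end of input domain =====

-- B replaces A's visited-set cycle detection by Floyd's tortoise-and-hare (O(1) memory, no
-- hashing): phase 1 finds a meeting point in the cycle, phase 2 walks to the cycle start,
-- which is the first repeated screen, and rates only that screen. A's hash() keying is
-- ported as the joined string (exact whenever Python's hash() is collision-free on the keys
-- encountered). Pre_ excludes exactly the inputs where A raises IndexError.


-- ===== PORT A =====
-- screen_hash: Python's str hash() is implementation-defined (seeded); we key on the joined
-- string itself — exact whenever hash() is collision-free on the keys A encounters.
def screenHash (scr : List String) : String := PySem.Str.join "\n" scr

-- biodiversity_rating: i = y*len(scr[0])+x is ≥ 0, so 2**i is 2 ^ toNat; scr[0] is only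
-- evaluated inside the loop body (scr ≠ []), so the pyGetD default is unreachable.
def biodiversityRating (scr : List String) : Int :=
  (PySem.List.enumerate scr).foldl (fun ret yrow =>
    (PySem.List.enumerate yrow.2.toList).foldl (fun ret xc =>
      if xc.2 = '#' then
        ret + 2 ^ (yrow.1 * PySem.Str.len (PySem.List.pyGetD scr 0 "") + xc.1).toNat
      else ret) ret) 0

-- get_adjacents; scr[child_y][child_x] is in range on the inputs Pre_ admits (Python raises
-- IndexError exactly where the index is past the row, which Pre_ excludes).
def getAdjacents (scr : List String) (x y : Int) : List Char :=
  let height : Int := scr.length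
  let width : Int := PySem.Str.len (PySem.List.pyGetD scr 0 "")
  [((0 : Int), (1 : Int)), (1, 0), (0, -1), (-1, 0)].map (fun d =>
    let childX := x + d.1
    let childY := y + d.2
    if ¬ (0 ≤ childX ∧ childX < width) then '.'
    else if ¬ (0 ≤ childY ∧ childY < height) then '.'
    else PySem.List.pyGetD (PySem.List.pyGetD scr childY "").toList childX ' ')

-- the character written for one cell of the new screen
def newChar (scr : List String) (y x : Int) (c : Char) : Char :=
  let numAdjacentBugs := (getAdjacents scr x y).countP (fun a => a == '#')
  if c = '#' then (if numAdjacentBugs = 1 then '#' else '.')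
  else (if numAdjacentBugs = 1 ∨ numAdjacentBugs = 2 then '#' else '.')

def iterateScreen (scr : List String) : List String :=
  (PySem.List.enumerate scr).foldl (fun newScr yrow =>
    newScr ++ [String.ofList ((PySem.List.enumerate yrow.2.toList).foldl (fun newRow xc =>
      newRow ++ [newChar scr yrow.1 xc.1 xc.2]) [])]) []

-- the while-True loop, with a fuel guard (2^(number of cells)+3 bounds the index of the first
-- repeated screen, so the fuel-0 branch is unreachable)
def computeLoop : Nat → List String → PySem.Set String → Int
  | 0, scr, _ => biodiversityRating scr
  | fuel + 1, scr, mem =>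
    let key := screenHash scr
    if PySem.Set.contains mem key then biodiversityRating scr
    else computeLoop fuel (iterateScreen scr) (PySem.Set.add mem key)

def compute (cts : String) : Int :=
  let scr := PySem.Str.splitlines cts
  computeLoop (2 ^ (scr.map (fun r => r.toList.length)).sum + 3) scr PySem.Set.empty

-- ===== PORT B =====
-- Source B's bug(): 1 when (x, y) is inside the width/height rectangle and holds a '#'
def bugAlt (height width : Int) (g : List String) (y x : Int) : Int :=
  if ¬ (0 ≤ y ∧ y < height ∧ 0 ≤ x ∧ x < width) then 0
  else
    let row := PySem.List.pyGetD g y ""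
    if x < PySem.Str.len row ∧ PySem.List.pyGetD row.toList x ' ' = '#' then 1 else 0

-- Source B's step(): one generation of the automaton
def stepAltB (height width : Int) (g : List String) : List String :=
  (PySem.List.pyRange 0 height 1).foldl (fun out y =>
    let row := PySem.List.pyGetD g y ""
    out ++ [String.ofList ((PySem.List.pyRange 0 (PySem.Str.len row) 1).foldl (fun new x =>
      let n := bugAlt height width g y (x - 1) + bugAlt height width g y (x + 1) +
               bugAlt height width g (y - 1) x + bugAlt height width g (y + 1) x
      let alive := PySem.List.pyGetD row.toList x ' ' = '#'
      new ++ [if n = 1 ∨ (¬ alive ∧ n = 2) then '#' else '.']) [])]) []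

-- Source B's rating()
def ratingAlt (height width : Int) (g : List String) : Int :=
  (PySem.List.pyRange 0 height 1).foldl (fun total y =>
    let row := PySem.List.pyGetD g y ""
    (PySem.List.pyRange 0 (PySem.Str.len row) 1).foldl (fun total x =>
      if PySem.List.pyGetD row.toList x ' ' = '#' then total + 2 ^ (width * y + x).toNat
      else total) total) 0

-- Floyd phase 1: tortoise one step, hare two, until they meet (fuel guard; the fuel-0
-- branch is unreachable)
def floydPhase1B : Nat → Int → Int → List String → List String → List String
  | 0, _, _, t, _ => t
  | fuel + 1, height, width, t, hr =>
    if t = hr then t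
    else floydPhase1B fuel height width (stepAltB height width t)
      (stepAltB height width (stepAltB height width hr))

-- Floyd phase 2: both one step at a time, to the cycle start
def floydPhase2B : Nat → Int → Int → List String → List String → List String
  | 0, _, _, t, _ => t
  | fuel + 1, height, width, t, hr =>
    if t = hr then t
    else floydPhase2B fuel height width (stepAltB height width t) (stepAltB height width hr)

def compute_alt (cts : String) : Int :=
  let grid := PySem.Str.splitlines cts
  let height : Int := grid.length
  let width : Int := if grid ≠ [] then PySem.Str.len (PySem.List.pyGetD grid 0 "") else 0
  let fuel := 2 ^ (grid.map (fun r => r.toList.length)).sum + 3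
  let hare := floydPhase1B fuel height width (stepAltB height width grid)
    (stepAltB height width (stepAltB height width grid))
  ratingAlt height width (floydPhase2B fuel height width grid hare)

-- ===== PRECONDITION & SPEC =====
-- Pre_ excludes exactly the inputs on which A raises IndexError: some line shorter than the
-- first line (the neighbour lookups then index past that row).
def Pre_compute (cts : String) : Prop :=
  ((PySem.Str.splitlines cts).all (fun row =>
    decide (((PySem.Str.splitlines cts).headD "").toList.length ≤ row.toList.length))) = true

instance (cts : String) : Decidable (Pre_compute cts) := by unfold Pre_compute; infer_instance

def pvWitness_compute : String := "#.\n.#"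

def Spec_compute (cts : String) (out : Int) : Prop := out = compute_alt cts
instance (cts : String) (out : Int) : Decidable (Spec_compute cts out) := by unfold Spec_compute; infer_instance

-- ===== CLAIM (what is proved, stated in full; the proofs are below) =====
def Claim_equal_compute : Prop := ∀ (cts : String), Dom_compute cts → Pre_compute cts → Spec_compute cts (compute cts)


-- ===== LEMMAS AND PROOFS =====

-- the orbit of screens
def TScr (g0 : List String) (n : Nat) : List String := iterateScreen^[n] g0

-- the row lengths of a screen (invariant under iterateScreen)
def lens (u : List String) : List Nat := u.map (fun r => r.toList.length)

-- screens whose characters are only '#' and '.' (every iterateScreen output)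
def NormScr (u : List String) : Prop := ∀ r ∈ u, ∀ c ∈ r.toList, c = '#' ∨ c = '.'

-- little-endian value of a bit list
def val : List Bool → Int
  | [] => 0
  | b :: bs => (if b then 1 else 0) + 2 * val bs

-- row-major flattening of the grid to bits
def cellsOf (scr : List String) : List Bool :=
  scr.flatMap (fun row => row.toList.map (fun c => c == '#'))

theorem val_nonneg (bs : List Bool) : 0 ≤ val bs := by
  induction bs with
  | nil => simp [val]
  | cons b bs ih => simp only [val]; cases b <;> simp <;> omega

theorem val_lt (bs : List Bool) : val bs < 2 ^ bs.length := by
  induction bs with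
  | nil => simp [val]
  | cons b bs ih =>
    simp only [val, List.length_cons, pow_succ]
    cases b <;> simp <;> omega

theorem val_inj (bs cs : List Bool) (hlen : bs.length = cs.length)
    (h : val bs = val cs) : bs = cs := by
  induction bs generalizing cs with
  | nil =>
    cases cs with
    | nil => rfl
    | cons c cs => simp at hlen
  | cons b bs ih =>
    cases cs with
    | nil => simp at hlen
    | cons c cs =>
      simp only [val] at h
      simp only [List.length_cons, Nat.add_right_cancel_iff] at hlen
      have hbc : b = c ∧ val bs = val cs := by
        cases b <;> cases c <;> simp at h ⊢ <;> omega
      rw [hbc.1, ih cs hlen hbc.2]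

theorem cells_length (scr : List String) :
    (cellsOf scr).length = (lens scr).sum := by
  induction scr with
  | nil => simp [cellsOf, lens]
  | cons r rest ih =>
    simp only [cellsOf, lens, List.flatMap_cons, List.length_append, List.length_map,
      List.map_cons, List.sum_cons] at *
    omega

theorem rowbits_inj : ∀ (a b : List Char), (∀ c ∈ a, c = '#' ∨ c = '.') →
    (∀ c ∈ b, c = '#' ∨ c = '.') →
    a.map (fun c => c == '#') = b.map (fun c => c == '#') → a = b := by
  intro a
  induction a with
  | nil =>
    intro b _ _ hm
    cases b with
    | nil => rfl
    | cons c cs => simp at hm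
  | cons c a ih =>
    intro b hca hcb hm
    cases b with
    | nil => simp at hm
    | cons d b =>
      simp only [List.map_cons, List.cons.injEq] at hm
      have hc1 := hca c (by simp)
      have hc2 := hcb d (by simp)
      have hcd : c = d := by
        rcases hc1 with rfl | rfl <;> rcases hc2 with rfl | rfl <;> simp_all
      rw [hcd, ih b (fun e he => hca e (by simp [he])) (fun e he => hcb e (by simp [he])) hm.2]

theorem cells_inj : ∀ (u v : List String), lens u = lens v → NormScr u → NormScr v →
    cellsOf u = cellsOf v → u = v := by
  intro u
  induction u with
  | nil =>
    intro v hlen _ _ _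
    cases v with
    | nil => rfl
    | cons r2 v' => simp [lens] at hlen
  | cons r1 u' ih =>
    intro v hlen hu hv hc
    cases v with
    | nil => simp [lens] at hlen
    | cons r2 v' =>
      simp only [lens, List.map_cons, List.cons.injEq] at hlen
      simp only [cellsOf, List.flatMap_cons] at hc
      have hsplit := List.append_inj hc (by simp [hlen.1])
      have hrow := rowbits_inj r1.toList r2.toList (hu r1 (by simp)) (hv r2 (by simp)) hsplit.1
      have hstr : r1 = r2 := by
        have := congrArg String.ofList hrow
        simpa using this
      have htail := ih v' hlen.2
        (fun r hr => hu r (by simp [hr])) (fun r hr => hv r (by simp [hr]))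
        (by simpa [cellsOf] using hsplit.2)
      rw [hstr, htail]

theorem join_chars_inj : ∀ (s t : List (List Char)), s.map List.length = t.map List.length →
    PySem.Chars.join ['\n'] s = PySem.Chars.join ['\n'] t → s = t := by
  intro s
  induction s with
  | nil =>
    intro t hlen _
    cases t with
    | nil => rfl
    | cons a b => simp at hlen
  | cons r1 s ih =>
    intro t hlen hj
    cases t with
    | nil => simp at hlen
    | cons r2 t =>
      simp only [List.map_cons, List.cons.injEq] at hlen
      cases s with
      | nil =>
        cases t with
        | nil =>
          rw [PySem.Chars.join_singleton, PySem.Chars.join_singleton] at hj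
          rw [hj]
        | cons a b => simp at hlen
      | cons r3 s' =>
        cases t with
        | nil => simp at hlen
        | cons r4 t' =>
          rw [PySem.Chars.join_cons_cons, PySem.Chars.join_cons_cons] at hj
          have h1 := List.append_inj hj (by simp [hlen.1])
          have h2 := List.append_inj h1.1 (by simp [hlen.1])
          have htail := ih (r4 :: t') (by simpa using hlen.2) h1.2
          rw [h2.1, htail]

theorem join_inj (s t : List String) (hlen : lens s = lens t)
    (hj : screenHash s = screenHash t) : s = t := by
  have hj' := congrArg String.toList hj
  unfold screenHash at hj'
  rw [PySem.Str.toList_join, PySem.Str.toList_join] at hj'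
  have hlen' : (s.map String.toList).map List.length = (t.map String.toList).map List.length := by
    simpa [List.map_map, Function.comp, lens] using hlen
  have hmap := join_chars_inj (s.map String.toList) (t.map String.toList) hlen'
    (by simpa using hj')
  have hinj : Function.Injective String.toList := by
    intro a b hab
    have := congrArg String.ofList hab
    simpa using this
  exact List.map_injective_iff.mpr hinj hmap

theorem iterate_eq_map (scr : List String) :
    iterateScreen scr = (PySem.List.enumerate scr).map (fun yrow =>
      String.ofList ((PySem.List.enumerate yrow.2.toList).map (fun xc =>
        newChar scr yrow.1 xc.1 xc.2))) := by
  unfold iterateScreen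
  simp only [PySem.List.foldl_append_singleton_eq_map, List.nil_append]

theorem newChar_mem (scr : List String) (y x : Int) (c : Char) :
    newChar scr y x c = '#' ∨ newChar scr y x c = '.' := by
  simp only [newChar]
  by_cases hc : c = '#'
  · by_cases h1 : (getAdjacents scr x y).countP (fun a => a == '#') = 1 <;> simp [hc, h1]
  · by_cases h1 : (getAdjacents scr x y).countP (fun a => a == '#') = 1 <;>
      by_cases h2 : (getAdjacents scr x y).countP (fun a => a == '#') = 2 <;>
      simp [hc, h1, h2]

theorem lens_iterate (u : List String) : lens (iterateScreen u) = lens u := by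
  rw [iterate_eq_map]
  unfold lens
  rw [List.map_map]
  apply List.ext_getElem
  · simp [PySem.List.length_enumerate]
  · intro i hi1 hi2
    simp only [List.getElem_map, Function.comp_apply,
      PySem.List.getElem_enumerate _ 0 i (by simpa [PySem.List.length_enumerate] using hi1)]
    simp [String.toList_ofList, PySem.List.length_enumerate,
      List.getElem_map]

theorem norm_iterate (u : List String) : NormScr (iterateScreen u) := by
  rw [iterate_eq_map]
  intro r hr
  simp only [List.mem_map] at hr
  obtain ⟨yrow, _, rfl⟩ := hr
  intro c hc
  simp only [String.toList_ofList, List.mem_map] at hc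
  obtain ⟨xc, _, rfl⟩ := hc
  exact newChar_mem u yrow.1 xc.1 xc.2

theorem T_succ (g0 : List String) (n : Nat) :
    TScr g0 (n + 1) = iterateScreen (TScr g0 n) := Function.iterate_succ_apply' _ _ _

theorem lens_T (g0 : List String) (n : Nat) : lens (TScr g0 n) = lens g0 := by
  induction n with
  | zero => rfl
  | succ n ih => rw [T_succ, lens_iterate, ih]

theorem norm_T (g0 : List String) (n : Nat) : NormScr (TScr g0 (n + 1)) := by
  rw [T_succ]; exact norm_iterate _

theorem T_shift (g0 : List String) (a b : Nat) (hab : TScr g0 a = TScr g0 b) (t : Nat) :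
    TScr g0 (a + t) = TScr g0 (b + t) := by
  induction t with
  | zero => simpa using hab
  | succ t ih =>
    rw [show a + (t + 1) = (a + t) + 1 from rfl, show b + (t + 1) = (b + t) + 1 from rfl,
      T_succ, T_succ, ih]

-- length and leading-row width through lens
theorem length_of_lens (u v : List String) (h : lens u = lens v) : u.length = v.length := by
  have := congrArg List.length h
  simpa [lens] using this

theorem row0_of_lens (u v : List String) (h : lens u = lens v) :
    PySem.Str.len (PySem.List.pyGetD u 0 "") = PySem.Str.len (PySem.List.pyGetD v 0 "") := by
  cases u with
  | nil =>
    cases v with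
    | nil => rfl
    | cons r2 v' => simp [lens] at h
  | cons r1 u' =>
    cases v with
    | nil => simp [lens] at h
    | cons r2 v' =>
      simp only [lens, List.map_cons, List.cons.injEq] at h
      rw [PySem.List.pyGetD_ofNat', PySem.List.pyGetD_ofNat']
      simp [PySem.Str.len_eq, List.getD, h.1]

-- ===== B's step equals A's iterate, cell by cell =====

-- one bug probe equals the '#'-indicator of the corresponding get_adjacents entry
theorem bug_ind (H W : Int) (g : List String) (cy cx : Int) :
    bugAlt H W g cy cx
      = (if ((if ¬ (0 ≤ cx ∧ cx < W) then '.'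
              else if ¬ (0 ≤ cy ∧ cy < H) then '.'
              else PySem.List.pyGetD (PySem.List.pyGetD g cy "").toList cx ' ') == '#') = true
         then 1 else 0) := by
  by_cases hx : 0 ≤ cx ∧ cx < W
  · by_cases hy : 0 ≤ cy ∧ cy < H
    · by_cases hlt : cx < PySem.Str.len (PySem.List.pyGetD g cy "")
      · have hlt' : cx < ((PySem.List.pyGetD g cy "").length : Int) := by
          simpa [PySem.Str.len_eq] using hlt
        by_cases hch : PySem.List.pyGetD (PySem.List.pyGetD g cy "").toList cx ' ' = '#' <;>
          simp [bugAlt, hx.1, hx.2, hy.1, hy.2, hlt', hch]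
      · have hdef : PySem.List.pyGetD (PySem.List.pyGetD g cy "").toList cx ' ' = ' ' := by
          rw [PySem.List.pyGetD_of_nonneg _ _ hx.1]
          apply List.getD_eq_default
          simp only [PySem.Str.len_eq] at hlt
          omega
        have hlt' : ¬ cx < ((PySem.List.pyGetD g cy "").length : Int) := by
          simpa [PySem.Str.len_eq] using hlt
        simp [bugAlt, hx.1, hx.2, hy.1, hy.2, hlt', hdef]
    · have hcond : ¬ (0 ≤ cy ∧ cy < H ∧ 0 ≤ cx ∧ cx < W) := by tauto
      simp [bugAlt, hcond, hx, hy]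
  · have hcond : ¬ (0 ≤ cy ∧ cy < H ∧ 0 ≤ cx ∧ cx < W) := by tauto
    simp [bugAlt, hcond, hx]

-- the adjacency count of A equals the four bug probes of B
theorem countAdj (g : List String) (x y : Int) :
    (((getAdjacents g x y).countP (fun a => a == '#') : Nat) : Int)
      = bugAlt (g.length : Int) (PySem.Str.len (PySem.List.pyGetD g 0 "")) g (y + 1) x
      + bugAlt (g.length : Int) (PySem.Str.len (PySem.List.pyGetD g 0 "")) g y (x + 1)
      + bugAlt (g.length : Int) (PySem.Str.len (PySem.List.pyGetD g 0 "")) g (y - 1) x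
      + bugAlt (g.length : Int) (PySem.Str.len (PySem.List.pyGetD g 0 "")) g y (x - 1) := by
  rw [bug_ind, bug_ind, bug_ind, bug_ind]
  simp only [getAdjacents, List.map_cons, List.map_nil, List.countP_cons, List.countP_nil,
    Nat.zero_add, add_zero, zero_add]
  have e3 : x + -1 = x - 1 := by ring
  have e4 : y + -1 = y - 1 := by ring
  rw [e3, e4]
  push_cast
  by_cases b1 : ((if ¬ (0 ≤ x ∧ x < PySem.Str.len (PySem.List.pyGetD g 0 "")) then '.'
      else if ¬ (0 ≤ y + 1 ∧ y + 1 < (g.length : Int)) then '.'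
      else PySem.List.pyGetD (PySem.List.pyGetD g (y + 1) "").toList x ' ') == '#') = true <;>
  by_cases b2 : ((if ¬ (0 ≤ x + 1 ∧ x + 1 < PySem.Str.len (PySem.List.pyGetD g 0 "")) then '.'
      else if ¬ (0 ≤ y ∧ y < (g.length : Int)) then '.'
      else PySem.List.pyGetD (PySem.List.pyGetD g y "").toList (x + 1) ' ') == '#') = true <;>
  by_cases b3 : ((if ¬ (0 ≤ x ∧ x < PySem.Str.len (PySem.List.pyGetD g 0 "")) then '.'
      else if ¬ (0 ≤ y - 1 ∧ y - 1 < (g.length : Int)) then '.'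
      else PySem.List.pyGetD (PySem.List.pyGetD g (y - 1) "").toList x ' ') == '#') = true <;>
  by_cases b4 : ((if ¬ (0 ≤ x - 1 ∧ x - 1 < PySem.Str.len (PySem.List.pyGetD g 0 "")) then '.'
      else if ¬ (0 ≤ y ∧ y < (g.length : Int)) then '.'
      else PySem.List.pyGetD (PySem.List.pyGetD g y "").toList (x - 1) ' ') == '#') = true <;>
    simp [b1, b2, b3, b4] <;> ring

-- one cell of B's step equals A's new_char
theorem cell_eq (g : List String) (y x : Int) :
    (if (bugAlt (g.length : Int) (PySem.Str.len (PySem.List.pyGetD g 0 "")) g y (x - 1) +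
         bugAlt (g.length : Int) (PySem.Str.len (PySem.List.pyGetD g 0 "")) g y (x + 1) +
         bugAlt (g.length : Int) (PySem.Str.len (PySem.List.pyGetD g 0 "")) g (y - 1) x +
         bugAlt (g.length : Int) (PySem.Str.len (PySem.List.pyGetD g 0 "")) g (y + 1) x) = 1
        ∨ (¬ (PySem.List.pyGetD (PySem.List.pyGetD g y "").toList x ' ' = '#') ∧
           (bugAlt (g.length : Int) (PySem.Str.len (PySem.List.pyGetD g 0 "")) g y (x - 1) +
            bugAlt (g.length : Int) (PySem.Str.len (PySem.List.pyGetD g 0 "")) g y (x + 1) +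
            bugAlt (g.length : Int) (PySem.Str.len (PySem.List.pyGetD g 0 "")) g (y - 1) x +
            bugAlt (g.length : Int) (PySem.Str.len (PySem.List.pyGetD g 0 "")) g (y + 1) x) = 2)
     then '#' else '.')
      = newChar g y x (PySem.List.pyGetD (PySem.List.pyGetD g y "").toList x ' ') := by
  have hc := countAdj g x y
  have hn : (bugAlt (g.length : Int) (PySem.Str.len (PySem.List.pyGetD g 0 "")) g y (x - 1) +
      bugAlt (g.length : Int) (PySem.Str.len (PySem.List.pyGetD g 0 "")) g y (x + 1) +
      bugAlt (g.length : Int) (PySem.Str.len (PySem.List.pyGetD g 0 "")) g (y - 1) x +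
      bugAlt (g.length : Int) (PySem.Str.len (PySem.List.pyGetD g 0 "")) g (y + 1) x)
      = (((getAdjacents g x y).countP (fun a => a == '#') : Nat) : Int) := by
    rw [hc]; ring
  rw [hn]
  simp only [newChar]
  by_cases hch : PySem.List.pyGetD (PySem.List.pyGetD g y "").toList x ' ' = '#'
  · by_cases h1 : (getAdjacents g x y).countP (fun a => a == '#') = 1 <;>
      simp [hch, h1] <;> omega
  · by_cases h1 : (getAdjacents g x y).countP (fun a => a == '#') = 1 <;>
      by_cases h2 : (getAdjacents g x y).countP (fun a => a == '#') = 2 <;>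
      simp [hch, h1, h2] <;> omega

theorem stepB_eq (g : List String) :
    stepAltB (g.length : Int) (PySem.Str.len (PySem.List.pyGetD g 0 "")) g = iterateScreen g := by
  rw [iterate_eq_map]
  unfold stepAltB
  rw [PySem.List.foldl_append_singleton_eq_map]
  rw [PySem.List.enumerate_eq_map_pyRange (d := ""), List.map_map]
  simp only [PySem.List.len_eq]
  apply List.map_congr_left
  intro y hy
  simp only [Function.comp_apply]
  rw [PySem.List.foldl_append_singleton_eq_map]
  rw [PySem.List.enumerate_eq_map_pyRange (d := ' '), List.map_map]
  simp only [PySem.List.len_eq, PySem.Str.len_eq]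
  apply congrArg
  apply List.map_congr_left
  intro x hx
  simp only [Function.comp_apply]
  exact cell_eq g y x

theorem rating_eq (g : List String) :
    ratingAlt (g.length : Int) (PySem.Str.len (PySem.List.pyGetD g 0 "")) g
      = biodiversityRating g := by
  unfold ratingAlt biodiversityRating
  rw [PySem.List.enumerate_eq_map_pyRange (d := ""), List.foldl_map]
  simp only [PySem.List.len_eq]
  apply PySem.List.foldl_congr_mem
  intro acc y hy
  rw [PySem.List.enumerate_eq_map_pyRange (d := ' '), List.foldl_map]
  simp only [PySem.List.len_eq, PySem.Str.len_eq]
  apply PySem.List.foldl_congr_mem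
  intro acc2 x hx
  by_cases hch : PySem.List.pyGetD (PySem.List.pyGetD g y "").toList x ' ' = '#' <;>
    simp [hch, mul_comm]

-- ===== loop evaluation lemmas =====

theorem computeLoop_eval (g0 : List String) (M : Nat)
    (hQ : ∃ i, i < M ∧ TScr g0 i = TScr g0 M)
    (hinj : ∀ i j, i < j → j < M → TScr g0 i ≠ TScr g0 j) :
    ∀ (fuel n : Nat) (mem : PySem.Set String), n ≤ M → M < fuel + n →
      (∀ x : String, x ∈ mem ↔ ∃ m, m < n ∧ x = screenHash (TScr g0 m)) →
      computeLoop fuel (TScr g0 n) mem = biodiversityRating (TScr g0 M) := by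
  intro fuel
  induction fuel with
  | zero => intro n mem hn hf _; omega
  | succ fuel ih =>
    intro n mem hn hf hmem
    simp only [computeLoop]
    rcases Nat.lt_or_ge n M with hlt | hge
    · have hc : PySem.Set.contains mem (screenHash (TScr g0 n)) = false := by
        rcases Bool.eq_false_or_eq_true (PySem.Set.contains mem (screenHash (TScr g0 n))) with hb | hb
        · obtain ⟨m, hm, heq⟩ := (hmem _).1 ((PySem.Set.contains_iff _ _).1 hb)
          have hscr : TScr g0 n = TScr g0 m :=
            join_inj _ _ (by rw [lens_T, lens_T]) heq
          exact absurd hscr.symm (hinj m n hm hlt)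
        · exact hb
      rw [hc]
      simp only [Bool.false_eq_true, if_false]
      rw [← T_succ]
      apply ih (n + 1) _ (by omega) (by omega)
      intro x
      rw [PySem.Set.mem_add, hmem x]
      constructor
      · rintro (⟨m, hm, rfl⟩ | rfl)
        · exact ⟨m, by omega, rfl⟩
        · exact ⟨n, by omega, rfl⟩
      · rintro ⟨m, hm, rfl⟩
        rcases Nat.lt_or_ge m n with h' | h'
        · exact Or.inl ⟨m, h', rfl⟩
        · have hmn : m = n := by omega
          subst hmn; exact Or.inr rfl
    · have hnM : n = M := by omega
      subst hnM
      have hc : PySem.Set.contains mem (screenHash (TScr g0 n)) = true := by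
        rw [PySem.Set.contains_iff, hmem]
        obtain ⟨i, hi, he⟩ := hQ
        exact ⟨i, hi, congrArg screenHash he.symm⟩
      rw [hc]
      simp

theorem floyd1B_eval (g0 : List String) (hh ww : Int)
    (hstep : ∀ n : Nat, stepAltB hh ww (TScr g0 n) = TScr g0 (n + 1))
    (K : Nat) (hK1 : 1 ≤ K)
    (hKeq : TScr g0 K = TScr g0 (2 * K))
    (hKmin : ∀ k, 1 ≤ k → k < K → TScr g0 k ≠ TScr g0 (2 * k)) :
    ∀ (fuel n : Nat), 1 ≤ n → n ≤ K → K < fuel + n →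
      floydPhase1B fuel hh ww (TScr g0 n) (TScr g0 (2 * n)) = TScr g0 K := by
  intro fuel
  induction fuel with
  | zero => intro n h1 hnK hf; omega
  | succ fuel ih =>
    intro n h1 hnK hf
    simp only [floydPhase1B]
    by_cases he : TScr g0 n = TScr g0 (2 * n)
    · rw [if_pos he]
      have hnEq : n = K := by
        by_contra hne
        exact hKmin n h1 (lt_of_le_of_ne hnK hne) he
      rw [hnEq]
    · rw [if_neg he]
      have hnlt : n < K := lt_of_le_of_ne hnK (by rintro rfl; exact he hKeq)
      have e2 : stepAltB hh ww (stepAltB hh ww (TScr g0 (2 * n))) = TScr g0 (2 * (n + 1)) := by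
        rw [show 2 * (n + 1) = 2 * n + 1 + 1 from by ring, hstep, hstep]
      rw [hstep n, e2]
      exact ih (n + 1) (by omega) (by omega) (by omega)

theorem floyd2B_eval (g0 : List String) (hh ww : Int)
    (hstep : ∀ n : Nat, stepAltB hh ww (TScr g0 n) = TScr g0 (n + 1))
    (K μ : Nat)
    (hμeq : TScr g0 (K + μ) = TScr g0 μ)
    (hμmin : ∀ i, i < μ → TScr g0 (K + i) ≠ TScr g0 i) :
    ∀ (fuel i : Nat), i ≤ μ → μ < fuel + i →
      floydPhase2B fuel hh ww (TScr g0 i) (TScr g0 (K + i)) = TScr g0 μ := by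
  intro fuel
  induction fuel with
  | zero => intro i hi hf; omega
  | succ fuel ih =>
    intro i hi hf
    simp only [floydPhase2B]
    by_cases he : TScr g0 i = TScr g0 (K + i)
    · rw [if_pos he]
      have hiEq : i = μ := by
        by_contra hne
        exact hμmin i (lt_of_le_of_ne hi hne) he.symm
      rw [hiEq]
    · rw [if_neg he]
      have hilt : i < μ := lt_of_le_of_ne hi (by rintro rfl; exact he hμeq.symm)
      have e2 : stepAltB hh ww (TScr g0 (K + i)) = TScr g0 (K + (i + 1)) := by
        rw [show K + (i + 1) = (K + i) + 1 from rfl, hstep]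
      rw [hstep i, e2]
      exact ih (i + 1) (by omega) (by omega)

-- ===== Floyd's algorithm meets the visited-set loop =====

theorem loops_agree (g0 : List String) (hh ww : Int)
    (hstep : ∀ n : Nat, stepAltB hh ww (TScr g0 n) = TScr g0 (n + 1)) :
    ∃ m : Nat,
      computeLoop (2 ^ (lens g0).sum + 3) g0 PySem.Set.empty = biodiversityRating (TScr g0 m)
      ∧ floydPhase2B (2 ^ (lens g0).sum + 3) hh ww g0
          (floydPhase1B (2 ^ (lens g0).sum + 3) hh ww (stepAltB hh ww g0)
            (stepAltB hh ww (stepAltB hh ww g0))) = TScr g0 m := by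
  have hshift := T_shift g0
  -- every screen from index 1 on is a '#'/'.' rendering of at most 2^C cells
  have hbound : ∀ n : Nat, 0 ≤ val (cellsOf (TScr g0 (n + 1))) ∧
      val (cellsOf (TScr g0 (n + 1))) < 2 ^ (lens g0).sum := by
    intro n
    refine ⟨val_nonneg _, ?_⟩
    have h2 := val_lt (cellsOf (TScr g0 (n + 1)))
    rw [cells_length, lens_T] at h2
    exact h2
  -- pigeonhole: two equal screens among indices 1 .. 2^C + 1
  have hmaps : ∀ n ∈ Finset.range (2 ^ (lens g0).sum + 1),
      (val (cellsOf (TScr g0 (n + 1)))).toNat ∈ Finset.range (2 ^ (lens g0).sum) := by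
    intro n _
    have h1 := (hbound n).1
    have h2 : val (cellsOf (TScr g0 (n + 1))) < ((2 ^ (lens g0).sum : Nat) : Int) := by
      exact_mod_cast (hbound n).2
    simp only [Finset.mem_range]
    omega
  have hcard : (Finset.range (2 ^ (lens g0).sum)).card
      < (Finset.range (2 ^ (lens g0).sum + 1)).card := by simp
  obtain ⟨a, ha, b, hb, hab, heqab⟩ :=
    Finset.exists_ne_map_eq_of_card_lt_of_maps_to hcard hmaps
  have hvals : val (cellsOf (TScr g0 (a + 1))) = val (cellsOf (TScr g0 (b + 1))) := by
    have h1 := (hbound a).1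
    have h2 := (hbound b).1
    omega
  have hsab : TScr g0 (a + 1) = TScr g0 (b + 1) := by
    apply cells_inj _ _ (by rw [lens_T, lens_T]) (norm_T g0 a) (norm_T g0 b)
    apply val_inj _ _ _ hvals
    rw [cells_length, cells_length, lens_T, lens_T]
  simp only [Finset.mem_range] at ha hb
  have hQex : ∃ j, ∃ i, i < j ∧ TScr g0 i = TScr g0 j := by
    rcases Nat.lt_or_ge a b with hlt | hge
    · exact ⟨b + 1, a + 1, by omega, hsab⟩
    · exact ⟨a + 1, b + 1, by omega, hsab.symm⟩
  have hQbounded : ∃ j, j ≤ 2 ^ (lens g0).sum + 1 ∧ ∃ i, i < j ∧ TScr g0 i = TScr g0 j := by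
    rcases Nat.lt_or_ge a b with hlt | hge
    · exact ⟨b + 1, by omega, a + 1, by omega, hsab⟩
    · exact ⟨a + 1, by omega, b + 1, by omega, hsab.symm⟩
  haveI : DecidablePred fun j => ∃ i, i < j ∧ TScr g0 i = TScr g0 j := fun j =>
    decidable_of_iff (∃ i ∈ Finset.range j, TScr g0 i = TScr g0 j) (by simp)
  obtain ⟨M, hMle, hQM, hinj⟩ : ∃ M, M ≤ 2 ^ (lens g0).sum + 1 ∧
      (∃ i, i < M ∧ TScr g0 i = TScr g0 M) ∧
      (∀ i j, i < j → j < M → TScr g0 i ≠ TScr g0 j) := by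
    refine ⟨Nat.find hQex, ?_, Nat.find_spec hQex, ?_⟩
    · obtain ⟨j, hjle, hj⟩ := hQbounded
      exact (Nat.find_min' hQex hj).trans hjle
    · intro i j hij hjM hne
      exact Nat.find_min hQex hjM ⟨i, hij, hne⟩
  -- μ: an index < M whose screen recurs at M; lam: the distance
  obtain ⟨μ, hμlt, hμeq⟩ := hQM
  obtain ⟨lam, hlamdef⟩ : ∃ lam, lam = M - μ := ⟨M - μ, rfl⟩
  have hlam1 : 1 ≤ lam := by omega
  have hμlam : μ + lam = M := by omega
  -- λ-periodicity from μ onwards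
  have hperiod : ∀ n, μ ≤ n → TScr g0 (n + lam) = TScr g0 n := by
    intro n hn
    obtain ⟨t, rfl⟩ := Nat.exists_eq_add_of_le hn
    have h1 : TScr g0 (μ + lam) = TScr g0 μ := by rw [hμlam]; exact hμeq.symm
    have := hshift (μ + lam) μ h1 t
    rw [show μ + lam + t = μ + t + lam from by ring] at this
    exact this
  have hmul : ∀ n t, μ ≤ n → TScr g0 (n + t * lam) = TScr g0 n := by
    intro n t hn
    induction t with
    | zero => simp
    | succ t ih =>
      rw [show n + (t + 1) * lam = n + t * lam + lam from by ring,
        hperiod (n + t * lam) (by omega), ih]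
  have hminper : ∀ p, 1 ≤ p → p < lam → TScr g0 (μ + p) ≠ TScr g0 μ := by
    intro p h1 hp heqc
    exact hinj μ (μ + p) (by omega) (by omega) heqc.symm
  -- lam divides every period of every point ≥ μ
  have hdvd : ∀ n p, μ ≤ n → 1 ≤ p → TScr g0 (n + p) = TScr g0 n → lam ∣ p := by
    intro n p hn hp he
    have hbig : n ≤ μ + n * lam := by
      have := Nat.mul_le_mul_left n hlam1
      omega
    have h1 : TScr g0 (μ + n * lam + p) = TScr g0 (μ + n * lam) := by
      have hsh := hshift (n + p) n he (μ + n * lam - n)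
      rw [show n + p + (μ + n * lam - n) = μ + n * lam + p from by omega,
        show n + (μ + n * lam - n) = μ + n * lam from by omega] at hsh
      exact hsh
    have h2 : TScr g0 (μ + n * lam) = TScr g0 μ := hmul μ n le_rfl
    have h3 : TScr g0 (μ + n * lam + p) = TScr g0 (μ + p % lam) := by
      have hpd := Nat.div_add_mod p lam
      have hcomm : (n + p / lam) * lam = n * lam + lam * (p / lam) := by ring
      rw [show μ + n * lam + p = (μ + p % lam) + (n + p / lam) * lam from by omega]
      exact hmul (μ + p % lam) (n + p / lam) (by omega)
    have h4 : TScr g0 (μ + p % lam) = TScr g0 μ := by rw [← h3, h1, h2]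
    by_contra hndvd
    have hr1 : 1 ≤ p % lam := by
      rcases Nat.eq_zero_or_pos (p % lam) with h0 | h0
      · exact absurd (Nat.dvd_of_mod_eq_zero h0) hndvd
      · omega
    exact hminper (p % lam) hr1 (Nat.mod_lt _ (by omega)) h4
  -- every periodic point lies at index ≥ μ
  have hleast : ∀ n p, 1 ≤ p → TScr g0 (n + p) = TScr g0 n → μ ≤ n := by
    intro n p hp he
    by_contra hlt
    push_neg at hlt
    have hrep : ∀ t, TScr g0 (n + t * p) = TScr g0 n := by
      intro t
      induction t with
      | zero => simp
      | succ t ih =>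
        have hsh := hshift (n + p) n he (t * p)
        rw [show n + p + t * p = n + (t + 1) * p from by ring] at hsh
        rw [hsh, ih]
    have hge : μ ≤ n + μ * p := by
      have := Nat.mul_le_mul_left μ hp
      omega
    have h5 : TScr g0 (μ + (n + μ * p - μ)) = TScr g0 n := by
      rw [show μ + (n + μ * p - μ) = n + μ * p from by omega]
      exact hrep μ
    have h6 : TScr g0 (μ + (n + μ * p - μ) % lam) = TScr g0 (μ + (n + μ * p - μ)) := by
      have hpd := Nat.div_add_mod (n + μ * p - μ) lam
      have hc2 : ((n + μ * p - μ) / lam) * lam = lam * ((n + μ * p - μ) / lam) := by ring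
      rw [show μ + (n + μ * p - μ) = (μ + (n + μ * p - μ) % lam) + ((n + μ * p - μ) / lam) * lam
        from by omega]
      exact (hmul (μ + (n + μ * p - μ) % lam) ((n + μ * p - μ) / lam) (by omega)).symm
    have hcontr : TScr g0 n = TScr g0 (μ + (n + μ * p - μ) % lam) := by rw [h6, h5]
    have hmlt : (n + μ * p - μ) % lam < lam := Nat.mod_lt _ (by omega)
    have hjM : μ + (n + μ * p - μ) % lam < M := by omega
    have hnj : n < μ + (n + μ * p - μ) % lam := by omega
    exact hinj n (μ + (n + μ * p - μ) % lam) hnj hjM hcontr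
  -- the phase-1 meeting index K
  have hk0prop : 1 ≤ lam * (μ / lam + 1) ∧
      TScr g0 (lam * (μ / lam + 1)) = TScr g0 (2 * (lam * (μ / lam + 1))) := by
    constructor
    · have h11 : 1 * 1 ≤ lam * (μ / lam + 1) :=
        Nat.mul_le_mul hlam1 (Nat.succ_le_succ (Nat.zero_le _))
      simpa using h11
    · have hpd := Nat.div_add_mod μ lam
      have hmlt : μ % lam < lam := Nat.mod_lt _ (by omega)
      have hk0μ : μ ≤ lam * (μ / lam + 1) := by
        have hthis : lam * (μ / lam + 1) = lam * (μ / lam) + lam := by ring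
        omega
      have hthis := hmul (lam * (μ / lam + 1)) (μ / lam + 1) hk0μ
      rw [show lam * (μ / lam + 1) + (μ / lam + 1) * lam = 2 * (lam * (μ / lam + 1))
        from by ring] at hthis
      exact hthis.symm
  have hk0le : lam * (μ / lam + 1) ≤ M := by
    have hpd := Nat.div_add_mod μ lam
    have hthis : lam * (μ / lam + 1) = lam * (μ / lam) + lam := by ring
    omega
  have hRex : ∃ k, 1 ≤ k ∧ TScr g0 k = TScr g0 (2 * k) := ⟨_, hk0prop⟩
  haveI : DecidablePred fun k => 1 ≤ k ∧ TScr g0 k = TScr g0 (2 * k) := fun k => inferInstance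
  obtain ⟨K, hKspec, hKle, hKmin⟩ : ∃ K, (1 ≤ K ∧ TScr g0 K = TScr g0 (2 * K)) ∧ K ≤ M ∧
      (∀ k, 1 ≤ k → k < K → TScr g0 k ≠ TScr g0 (2 * k)) := by
    refine ⟨Nat.find hRex, Nat.find_spec hRex, (Nat.find_min' hRex hk0prop).trans hk0le, ?_⟩
    intro k h1 hk hne
    exact Nat.find_min hRex hk ⟨h1, hne⟩
  have hKK : TScr g0 (K + K) = TScr g0 K := by
    rw [show K + K = 2 * K from by ring]
    exact hKspec.2.symm
  have hμK : μ ≤ K := hleast K K hKspec.1 hKK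
  have hlamK : lam ∣ K := hdvd K K hμK hKspec.1 hKK
  -- phase-2 hypotheses
  have hKμeq : TScr g0 (K + μ) = TScr g0 μ := by
    obtain ⟨c, hc⟩ := hlamK
    rw [show K + μ = μ + c * lam from by rw [hc]; ring]
    exact hmul μ c le_rfl
  have hKμmin : ∀ i, i < μ → TScr g0 (K + i) ≠ TScr g0 i := by
    intro i hi he
    have := hleast i K hKspec.1 (by rwa [Nat.add_comm] at he)
    omega
  -- evaluate both loops
  refine ⟨M, ?_, ?_⟩
  · have hseen := computeLoop_eval g0 M ⟨μ, hμlt, hμeq⟩ hinj (2 ^ (lens g0).sum + 3) 0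
      PySem.Set.empty (by omega) (by omega)
      (by intro x; simp [PySem.Set.empty])
    exact hseen
  · have hf1 : floydPhase1B (2 ^ (lens g0).sum + 3) hh ww (stepAltB hh ww g0)
        (stepAltB hh ww (stepAltB hh ww g0)) = TScr g0 K := by
      have h01 : stepAltB hh ww g0 = TScr g0 1 := hstep 0
      have h02 : stepAltB hh ww (stepAltB hh ww g0) = TScr g0 (2 * 1) := by
        rw [h01, hstep 1]
      rw [h02, h01]
      exact floyd1B_eval g0 hh ww hstep K hKspec.1 hKspec.2 hKmin (2 ^ (lens g0).sum + 3) 1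
        le_rfl hKspec.1 (by omega)
    rw [hf1]
    have hf2 := floyd2B_eval g0 hh ww hstep K μ hKμeq hKμmin (2 ^ (lens g0).sum + 3) 0
      (Nat.zero_le _) (by omega)
    have h00 : TScr g0 0 = g0 := rfl
    have hK0 : TScr g0 (K + 0) = TScr g0 K := by norm_num
    rw [h00, hK0] at hf2
    rw [hf2]
    exact hμeq

-- ===== VERDICT (by name: the statement is the Claim_ definition above) =====
theorem compute_spec : Claim_equal_compute := by
  unfold Claim_equal_compute
  intro cts _ hpre
  unfold Spec_compute
  cases hsl : PySem.Str.splitlines cts with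
  | nil =>
    simp only [compute, compute_alt, hsl]
    decide
  | cons r rest =>
    simp only [compute, compute_alt, hsl]
    have hne : (r :: rest : List String) ≠ [] := by simp
    rw [if_pos hne]
    -- the step hypothesis for the orbit of r :: rest
    have hstep : ∀ n : Nat, stepAltB ((r :: rest).length : Int)
        (PySem.Str.len (PySem.List.pyGetD (r :: rest) 0 "")) (TScr (r :: rest) n)
        = TScr (r :: rest) (n + 1) := by
      intro n
      have hl : ((r :: rest).length : Int) = ((TScr (r :: rest) n).length : Int) := by
        rw [length_of_lens (TScr (r :: rest) n) (r :: rest) (lens_T _ _)]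
      have hw : PySem.Str.len (PySem.List.pyGetD (r :: rest) 0 "")
          = PySem.Str.len (PySem.List.pyGetD (TScr (r :: rest) n) 0 "") := by
        rw [row0_of_lens (TScr (r :: rest) n) (r :: rest) (lens_T _ _)]
      rw [hl, hw, stepB_eq, T_succ]
    obtain ⟨m, hA, hB⟩ := loops_agree (r :: rest) ((r :: rest).length : Int)
      (PySem.Str.len (PySem.List.pyGetD (r :: rest) 0 "")) hstep
    have hfuel : (List.map (fun r => r.toList.length) (r :: rest)).sum = (lens (r :: rest)).sum := rfl
    rw [hfuel, hA, hB]
    -- the rating of T m equals its biodiversity rating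
    have hl : ((r :: rest).length : Int) = ((TScr (r :: rest) m).length : Int) := by
      rw [length_of_lens (TScr (r :: rest) m) (r :: rest) (lens_T _ _)]
    have hw : PySem.Str.len (PySem.List.pyGetD (r :: rest) 0 "")
        = PySem.Str.len (PySem.List.pyGetD (TScr (r :: rest) m) 0 "") := by
      rw [row0_of_lens (TScr (r :: rest) m) (r :: rest) (lens_T _ _)]
    rw [hl, hw, rating_eq]
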